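-- pv_equiv track=rewrite | github.com/oskrgab/personal_site | linkedin_backup/fix_blog_formatting.py | fix_content_formatting
-- ===== SOURCE A (Python) =====
-- def fix_content_formatting(content):
--     """Fix the formatting of blog post content."""
--     lines = content.split('\n')
--     fixed_lines = []
--     in_frontmatter = False
--     frontmatter_count = 0
--
--     for line in lines:
--         # Track frontmatter boundaries (between --- markers)
--         if line.strip() == '---':
--             frontmatter_count += 1
--             fixed_lines.append(line)
--             if frontmatter_count == 1:
--                 in_frontmatter = True
--             elif frontmatter_count == 2:
--                 in_frontmatter = False
--             continue
--
--         # Keep frontmatter lines as-is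
--         if in_frontmatter or frontmatter_count < 2:
--             fixed_lines.append(line)
--             continue
--
--         # Process content after frontmatter
--         stripped = line.strip()
--
--         # Empty quoted string becomes blank line
--         if stripped == '""':
--             fixed_lines.append('')
--         # Single quote on its own line - remove it
--         elif stripped == '"':
--             fixed_lines.append('')
--         # Line wrapped in quotes - remove them
--         elif stripped.startswith('"') and stripped.endswith('"') and len(stripped) > 1:
--             # Remove leading and trailing quotes
--             unquoted = stripped[1:-1]
--             fixed_lines.append(unquoted)
--         # Line with trailing quote only - remove it
--         elif stripped.endswith('"') and not stripped.startswith('"'):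
--             # Remove trailing quote
--             fixed_lines.append(stripped[:-1])
--         # Keep other lines as-is
--         else:
--             fixed_lines.append(line)
--
--     return '\n'.join(fixed_lines)
-- ===== SOURCE B (Python) =====
-- def _strip_quotes(line):
--     """Map one post-frontmatter line to its unquoted form."""
--     stripped = line.strip()
--     if stripped == '---':
--         return line
--     if stripped == '""' or stripped == '"':
--         return ''
--     if stripped.startswith('"') and stripped.endswith('"') and len(stripped) > 1:
--         return stripped[1:-1]
--     if stripped.endswith('"') and not stripped.startswith('"'):
--         return stripped[:-1]
--     return line
--
--
-- def _second_marker_index(lines):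
--     """Index of the second '---' marker line, or None."""
--     seen = 0
--     for i, line in enumerate(lines):
--         if line.strip() == '---':
--             seen += 1
--             if seen == 2:
--                 return i
--     return None
--
--
-- def fix_content_formatting(content):
--     """Fix the formatting of blog post content."""
--     lines = content.split('\n')
--     idx = _second_marker_index(lines)
--     if idx is None:
--         return '\n'.join(lines)
--     return '\n'.join(lines[:idx + 1] + [_strip_quotes(l) for l in lines[idx + 1:]])
-- ===== Notes on version B (the rewrite author's own statement) =====
-- stated objective: simpler
-- what changed: Replaces A's single stateful loop (an in_frontmatter flag and a marker counter threaded through every line) by locate-then-map: first find the index of the second frontmatter marker line, copy everything up to it verbatim, and map a pure per-line quote-stripping helper over the rest.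
import Mathlib
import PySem

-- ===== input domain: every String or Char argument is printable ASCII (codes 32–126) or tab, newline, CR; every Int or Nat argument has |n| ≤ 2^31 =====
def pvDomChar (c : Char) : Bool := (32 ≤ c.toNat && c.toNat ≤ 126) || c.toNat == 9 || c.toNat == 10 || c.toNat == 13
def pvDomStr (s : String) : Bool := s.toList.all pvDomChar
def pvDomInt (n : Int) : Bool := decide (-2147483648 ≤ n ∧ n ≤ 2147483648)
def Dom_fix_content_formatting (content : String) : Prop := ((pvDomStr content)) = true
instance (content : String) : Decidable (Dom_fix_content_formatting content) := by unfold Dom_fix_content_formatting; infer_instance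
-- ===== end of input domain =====

-- B replaces A's stateful frontmatter-tracking loop by locate-the-second-marker-then-map (simpler decomposition, same cost).


-- ===== PORT A =====
-- one loop iteration: state = (fixed_lines, in_frontmatter, frontmatter_count)
def fcfStep (st : List String × Bool × Int) (line : String) : List String × Bool × Int :=
  let fixed := st.1
  let in_fm := st.2.1
  let cnt := st.2.2
  if PySem.Str.strip line = "---" then
    let cnt := cnt + 1
    let fixed := fixed ++ [line]
    let in_fm := if cnt = 1 then true else if cnt = 2 then false else in_fm
    (fixed, in_fm, cnt)
  else if in_fm = true ∨ cnt < 2 then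
    (fixed ++ [line], in_fm, cnt)
  else
    let stripped := PySem.Str.strip line
    if stripped = "\"\"" then (fixed ++ [""], in_fm, cnt)
    else if stripped = "\"" then (fixed ++ [""], in_fm, cnt)
    else if PySem.Str.startswith stripped "\"" = true ∧ PySem.Str.endswith stripped "\"" = true ∧ 1 < PySem.Str.len stripped then
      (fixed ++ [PySem.Str.slice stripped (some 1) (some (-1))], in_fm, cnt)
    else if PySem.Str.endswith stripped "\"" = true ∧ PySem.Str.startswith stripped "\"" = false then
      (fixed ++ [PySem.Str.slice stripped none (some (-1))], in_fm, cnt)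
    else (fixed ++ [line], in_fm, cnt)

def fix_content_formatting (content : String) : String :=
  PySem.Str.join "\n" (List.foldl fcfStep ([], false, (0 : Int)) ((PySem.Str.split? content "\n").getD [])).1

-- ===== PORT B =====
-- per-line transform applied after the frontmatter (Source B's _strip_quotes)
def fcfStripQuotes (line : String) : String :=
  let stripped := PySem.Str.strip line
  if stripped = "---" then line
  else if stripped = "\"\"" ∨ stripped = "\"" then ""
  else if PySem.Str.startswith stripped "\"" = true ∧ PySem.Str.endswith stripped "\"" = true ∧ 1 < PySem.Str.len stripped then
    PySem.Str.slice stripped (some 1) (some (-1))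
  else if PySem.Str.endswith stripped "\"" = true ∧ PySem.Str.startswith stripped "\"" = false then
    PySem.Str.slice stripped none (some (-1))
  else line

-- Source B's _second_marker_index: index of the second '---' line, scanning once (seen = markers so far)
def fcfSecondMarker : List String → Nat → Option Nat
  | [], _ => none
  | l :: ls, seen =>
    if PySem.Str.strip l = "---" then
      if seen = 1 then some 0 else (fcfSecondMarker ls (seen + 1)).map (· + 1)
    else (fcfSecondMarker ls seen).map (· + 1)

def fix_content_formatting_alt (content : String) : String :=
  match fcfSecondMarker ((PySem.Str.split? content "\n").getD []) 0 with
  | none => PySem.Str.join "\n" ((PySem.Str.split? content "\n").getD [])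
  | some i => PySem.Str.join "\n" (((PySem.Str.split? content "\n").getD []).take (i + 1) ++
      (((PySem.Str.split? content "\n").getD []).drop (i + 1)).map fcfStripQuotes)

-- ===== PRECONDITION & SPEC =====
def Spec_fix_content_formatting (content : String) (out : String) : Prop := out = fix_content_formatting_alt content
instance (content : String) (out : String) : Decidable (Spec_fix_content_formatting content out) := by unfold Spec_fix_content_formatting; infer_instance

-- ===== CLAIM (what is proved, stated in full; the proofs are below) =====
def Claim_equal_fix_content_formatting : Prop := ∀ (content : String), Dom_fix_content_formatting content → Spec_fix_content_formatting content (fix_content_formatting content)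

-- ===== LEMMAS AND PROOFS =====

-- one non-marker step after the frontmatter emits exactly B's per-line transform
theorem fcf_step_emit (acc : List String) (c : Int) (l : String)
    (hm : ¬ PySem.Str.strip l = "---") (hc : ¬ ((false : Bool) = true ∨ c < 2)) :
    fcfStep (acc, false, c) l = (acc ++ [fcfStripQuotes l], false, c) := by
  unfold fcfStep fcfStripQuotes
  rw [if_neg hm, if_neg hc, if_neg hm]
  by_cases h0 : PySem.Str.strip l = "\"\""
  · rw [if_pos h0, if_pos (Or.inl h0 : PySem.Str.strip l = "\"\"" ∨ PySem.Str.strip l = "\"")]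
  · by_cases h1 : PySem.Str.strip l = "\""
    · rw [if_neg h0, if_pos h1, if_pos (Or.inr h1 : PySem.Str.strip l = "\"\"" ∨ PySem.Str.strip l = "\"")]
    · have hB : ¬ (PySem.Str.strip l = "\"\"" ∨ PySem.Str.strip l = "\"") := by tauto
      rw [if_neg h0, if_neg h1, if_neg hB]
      by_cases h2 : PySem.Str.startswith (PySem.Str.strip l) "\"" = true ∧ PySem.Str.endswith (PySem.Str.strip l) "\"" = true ∧ 1 < PySem.Str.len (PySem.Str.strip l)
      · rw [if_pos h2, if_pos h2]
      · rw [if_neg h2, if_neg h2]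
        by_cases h3 : PySem.Str.endswith (PySem.Str.strip l) "\"" = true ∧ PySem.Str.startswith (PySem.Str.strip l) "\"" = false
        · rw [if_pos h3, if_pos h3]
        · rw [if_neg h3, if_neg h3]

-- a marker step just appends the line; how the flag/count move depends on the count
theorem fcf_step_marker (acc : List String) (in_fm : Bool) (c : Int) (l : String)
    (hm : PySem.Str.strip l = "---") :
    fcfStep (acc, in_fm, c) l =
      (acc ++ [l], if c + 1 = 1 then true else if c + 1 = 2 then false else in_fm, c + 1) := by
  simp only [fcfStep, if_pos hm]

-- after the second marker (count ≥ 2, flag off) A's loop is exactly a map of the per-line transform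
theorem fcf_tail (ls : List String) : ∀ (acc : List String) (c : Int), 2 ≤ c →
    (List.foldl fcfStep (acc, false, c) ls).1 = acc ++ ls.map fcfStripQuotes := by
  induction ls with
  | nil => intro acc c _; simp
  | cons l ls ih =>
    intro acc c hc
    by_cases hm : PySem.Str.strip l = "---"
    · have h1 : ¬ (c + 1 = 1) := by omega
      have h2 : ¬ (c + 1 = 2) := by omega
      have hq : fcfStripQuotes l = l := by simp [fcfStripQuotes, hm]
      rw [List.foldl_cons, fcf_step_marker acc false c l hm, if_neg h1, if_neg h2,
        ih (acc ++ [l]) (c + 1) (by omega)]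
      simp [hq]
    · have hlt : ¬ ((false : Bool) = true ∨ c < 2) := by simp; omega
      rw [List.foldl_cons, fcf_step_emit acc c l hm hlt, ih _ _ hc]
      simp

-- before the second marker A's loop agrees with B's locate-then-map, for the two reachable states
theorem fcf_main (ls : List String) : ∀ (acc : List String) (seen : Nat) (in_fm : Bool) (c : Int),
    ((seen = 0 ∧ in_fm = false ∧ c = 0) ∨ (seen = 1 ∧ in_fm = true ∧ c = 1)) →
    (List.foldl fcfStep (acc, in_fm, c) ls).1 =
      (match fcfSecondMarker ls seen with
       | none => acc ++ ls
       | some i => acc ++ (ls.take (i + 1) ++ (ls.drop (i + 1)).map fcfStripQuotes)) := by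
  induction ls with
  | nil => intro acc seen in_fm c _; simp [fcfSecondMarker]
  | cons l ls ih =>
    intro acc seen in_fm c hst
    by_cases hm : PySem.Str.strip l = "---"
    · rcases hst with ⟨hs, hf, hc⟩ | ⟨hs, hf, hc⟩
      · subst hs; subst hf; subst hc
        rw [List.foldl_cons, fcf_step_marker acc false 0 l hm]
        norm_num
        rw [ih (acc ++ [l]) 1 true 1 (Or.inr ⟨rfl, rfl, rfl⟩)]
        simp only [fcfSecondMarker, if_pos hm]
        cases h2 : fcfSecondMarker ls 1 with
        | none => simp
        | some i => simp
      · subst hs; subst hf; subst hc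
        rw [List.foldl_cons, fcf_step_marker acc true 1 l hm]
        norm_num
        rw [fcf_tail ls (acc ++ [l]) 2 (by omega)]
        simp [fcfSecondMarker, hm]
    · have hkeep : in_fm = true ∨ c < 2 := by
        rcases hst with ⟨_, hf, hc⟩ | ⟨_, hf, _⟩
        · right; omega
        · left; exact hf
      have hstep : fcfStep (acc, in_fm, c) l = (acc ++ [l], in_fm, c) := by
        simp only [fcfStep, if_neg hm, if_pos hkeep]
      rw [List.foldl_cons, hstep, ih (acc ++ [l]) seen in_fm c hst]
      simp only [fcfSecondMarker, if_neg hm]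
      cases h2 : fcfSecondMarker ls seen with
      | none => simp
      | some i => simp

-- ===== VERDICT (by name: the statement is the Claim_ definition above) =====
theorem fix_content_formatting_spec : Claim_equal_fix_content_formatting := by
  intro content _
  unfold Spec_fix_content_formatting fix_content_formatting fix_content_formatting_alt
  rw [fcf_main ((PySem.Str.split? content "\n").getD []) [] 0 false 0 (Or.inl ⟨rfl, rfl, rfl⟩)]
  cases h : fcfSecondMarker ((PySem.Str.split? content "\n").getD []) 0 with
  | none => simp
  | some i => simp
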